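-- pv_equiv track=rewrite | github.com/myosintllc/my-osint-tools | exporter.py | organize_by_folder
-- ===== SOURCE A (Python) =====
-- from typing import Dict, List, Tuple
--
-- def organize_by_folder(bookmarklets: List[dict]) -> Dict[str, List[dict]]:
--     """Organize bookmarklets into nested folder structure"""
--     organized = {}
--
--     for bookmark in bookmarklets:
--         folder_path = bookmark['folder']
--         if folder_path not in organized:
--             organized[folder_path] = []
--         organized[folder_path].append(bookmark)
--
--     return organized
-- ===== SOURCE B (Python) =====
-- def organize_by_folder(bookmarklets):
--     """Organize bookmarklets into nested folder structure"""
--     folders = list(dict.fromkeys(b['folder'] for b in bookmarklets))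
--     return {f: [b for b in bookmarklets if b['folder'] == f] for f in folders}
-- ===== Notes on version B (the rewrite author's own statement) =====
-- stated objective: idiomatic
-- what changed: Replaces the incremental dict-insertion loop by a two-phase comprehension: dedup the folder keys in first-appearance order with dict.fromkeys, then build each group by filtering the whole list per folder.
import Mathlib
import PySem

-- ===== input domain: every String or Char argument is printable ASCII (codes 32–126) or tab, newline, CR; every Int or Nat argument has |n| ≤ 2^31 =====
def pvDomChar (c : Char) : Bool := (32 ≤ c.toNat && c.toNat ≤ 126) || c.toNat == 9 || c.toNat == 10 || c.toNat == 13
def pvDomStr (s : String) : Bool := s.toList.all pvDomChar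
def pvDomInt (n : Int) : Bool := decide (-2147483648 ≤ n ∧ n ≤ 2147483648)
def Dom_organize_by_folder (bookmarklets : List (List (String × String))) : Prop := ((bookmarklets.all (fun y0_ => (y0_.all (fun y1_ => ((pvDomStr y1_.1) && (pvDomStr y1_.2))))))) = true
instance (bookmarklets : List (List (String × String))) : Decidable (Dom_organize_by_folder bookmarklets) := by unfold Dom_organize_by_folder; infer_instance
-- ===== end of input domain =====

-- B regroups idiomatically: ordered key dedup then a per-folder filter, instead of A's incremental dict-insertion loop (same cost class, no speed claim).
-- ===== PORT A =====
-- Port of A: foldl over the bookmarks maintaining the insertion-ordered dict; missing 'folder'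
-- (Python KeyError, get? = none) is excluded by Pre_, the getD "" default is never reached there.
def organize_by_folder (bookmarklets : List (List (String × String))) : List (String × List (List (String × String))) :=
  (bookmarklets.foldl
    (fun organized bookmark =>
      let folder_path := ((PySem.Dict.mk bookmark).get? "folder").getD ""
      let organized := if organized.contains folder_path then organized else organized.insert folder_path []
      organized.insert folder_path (organized.getD folder_path [] ++ [bookmark]))
    PySem.Dict.empty).items

-- ===== PORT B =====
-- Port of B: dedup the folder keys in first-appearance order, then filter the list per folder.
def organize_by_folder_alt (bookmarklets : List (List (String × String))) : List (String × List (List (String × String))) :=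
  let key := fun (b : List (String × String)) => ((PySem.Dict.mk b).get? "folder").getD ""
  (PySem.List.dedup (bookmarklets.map key)).map
    (fun f => (f, bookmarklets.filter (fun b => key b == f)))

-- ===== PRECONDITION & SPEC =====
-- Pre_: every bookmark has a 'folder' key (Python A raises KeyError otherwise).
def Pre_organize_by_folder (bookmarklets : List (List (String × String))) : Prop :=
  (bookmarklets.all (fun b => (PySem.Dict.mk b).contains "folder")) = true
instance (bookmarklets : List (List (String × String))) : Decidable (Pre_organize_by_folder bookmarklets) := by unfold Pre_organize_by_folder; infer_instance
def pvWitness_organize_by_folder : (List (List (String × String))) :=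
  [[("folder", "a"), ("name", "x")], [("folder", "b")], [("folder", "a"), ("name", "y")]]
def Spec_organize_by_folder (bookmarklets : List (List (String × String))) (out : List (String × List (List (String × String)))) : Prop := out = organize_by_folder_alt bookmarklets
instance (bookmarklets : List (List (String × String))) (out : List (String × List (List (String × String)))) : Decidable (Spec_organize_by_folder bookmarklets out) := by unfold Spec_organize_by_folder; infer_instance

-- ===== CLAIM (what is proved, stated in full; the proofs are below) =====
def Claim_equal_organize_by_folder : Prop := ∀ (bookmarklets : List (List (String × String))), Dom_organize_by_folder bookmarklets → Pre_organize_by_folder bookmarklets → Spec_organize_by_folder bookmarklets (organize_by_folder bookmarklets)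

-- ===== LEMMAS AND PROOFS =====

-- A's loop body ('create-if-missing then append') is exactly a dict 'modify' with default [].
theorem pv_step_eq_modify (d : PySem.Dict String (List (List (String × String))))
    (fp : String) (b : List (String × String)) :
    (let d' := if d.contains fp then d else d.insert fp []
     d'.insert fp (d'.getD fp [] ++ [b])) = d.modify fp [] (· ++ [b]) := by
  by_cases h : d.contains fp = true
  · simp [h, PySem.Dict.modify]
  · have h' : d.contains fp = false := by simpa using h
    simp [h', PySem.Dict.modify, PySem.Dict.insert_insert_self,
      PySem.Dict.getD_insert_self, PySem.Dict.getD_of_not_contains d [] h']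

-- Characterisation of A's fold as dedup-of-keys plus per-key filter (B's shape).
theorem pv_fold_char (bs : List (List (String × String))) :
    organize_by_folder bs = organize_by_folder_alt bs := by
  unfold organize_by_folder organize_by_folder_alt
  set key := fun (b : List (String × String)) => ((PySem.Dict.mk b).get? "folder").getD "" with hkey
  have hstep : (fun (organized : PySem.Dict String (List (List (String × String)))) bookmark =>
      let folder_path := ((PySem.Dict.mk bookmark).get? "folder").getD ""
      let organized := if organized.contains folder_path then organized else organized.insert folder_path []
      organized.insert folder_path (organized.getD folder_path [] ++ [bookmark]))
      = (fun d b => d.modify (key b) [] (· ++ [b])) := by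
    funext d b
    exact pv_step_eq_modify d (key b) b
  rw [hstep]
  set D := bs.foldl (fun d b => d.modify (key b) [] (· ++ [b])) PySem.Dict.empty with hD
  have hnd : D.keys.Nodup := by
    rw [hD]
    exact PySem.Dict.nodup_keys_foldl_modify_key bs key [] (fun d b v => v ++ [b])
      PySem.Dict.empty (by simp [pysem])
  have hkeys : D.keys = PySem.List.dedup (bs.map key) := by
    rw [hD, PySem.Dict.keys_foldl_modify_key bs key [] (fun d b v => v ++ [b])]
    simp [pysem, PySem.Set.update, PySem.Set.ofList]
  have hpair : D = (bs.map (fun b => (key b, b))).foldl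
      (fun d p => d.modify p.1 [] (· ++ [p.2])) PySem.Dict.empty := by
    rw [hD, List.foldl_map]
  have hgetD : ∀ c, D.getD c [] = bs.filter (fun b => key b == c) := by
    intro c
    rw [hpair, PySem.Dict.getD_foldl_modify_append]
    simp [List.filter_map, Function.comp_def]
  rw [PySem.Dict.items_eq_map_keys D hnd [], hkeys]
  exact List.map_congr_left (fun k _ => by rw [hgetD k])

-- ===== VERDICT (by name: the statement is the Claim_ definition above) =====
theorem organize_by_folder_spec : Claim_equal_organize_by_folder := by
  intro bs _ _
  unfold Spec_organize_by_folder
  exact pv_fold_char bs
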